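-- pv_equiv track=rewrite | github.com/BigOasis/Python | JiaBae/Week8/PGS_150368_이모티콘할인행사.py | solution
-- ===== SOURCE A (Python) =====
-- from itertools import product
--
-- def solution(users, emoticons):
--     # 각 이모티콘의 할인별 가격 미리 계산
--     rates = [10, 20, 30, 40]
--     discounted = [
--         [price * (100 - r) // 100 for r in rates]
--         for price in emoticons
--     ]
--
--     best_sub = -1
--     best_rev = -1
--
--     # 모든 할인 배정 조합 탐색
--     for choice in product(range(4), repeat=len(emoticons)):
--         sub_cnt = 0
--         revenue = 0
--
--         # 각 사용자에 대해 구매합 계산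
--         for min_rate, limit_price in users:
--             buy_sum = 0
--             # min_rate 이상 할인된 이모티콘만 구매
--             for idx, sel in enumerate(choice):
--                 if rates[sel] >= min_rate:
--                     buy_sum += discounted[idx][sel]
--             # 구매합이 한도 이상이면  취소하고 가입
--             if buy_sum >= limit_price:
--                 sub_cnt += 1
--             else:
--                 revenue += buy_sum
--
--         # 1순위: 가입자 수 최댓값, 2순위: 매출 최댓값
--         if sub_cnt > best_sub or (sub_cnt == best_sub and revenue > best_rev):
--             best_sub, best_rev = sub_cnt, revenue
--
--     return [best_sub, best_rev]
-- ===== SOURCE B (Python) =====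
-- def solution(users, emoticons):
--     rates = [10, 20, 30, 40]
--     discounted = [[price * (100 - r) // 100 for r in rates] for price in emoticons]
--     n = len(emoticons)
--     m = len(users)
--     sums = [0] * m          # running buy-sum per user for the current partial assignment
--     best = [-1, -1]
--
--     def dfs(idx):
--         if idx == n:
--             sub_cnt = 0
--             revenue = 0
--             for u in range(m):
--                 if sums[u] >= users[u][1]:
--                     sub_cnt += 1
--                 else:
--                     revenue += sums[u]
--             if sub_cnt > best[0] or (sub_cnt == best[0] and revenue > best[1]):
--                 best[0], best[1] = sub_cnt, revenue
--             return
--         for sel in range(4):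
--             r = rates[sel]
--             d = discounted[idx][sel]
--             for u in range(m):
--                 if r >= users[u][0]:
--                     sums[u] += d
--             dfs(idx + 1)
--             for u in range(m):
--                 if r >= users[u][0]:
--                     sums[u] -= d
--
--     dfs(0)
--     return [best[0], best[1]]
-- ===== Notes on version B (the rewrite author's own statement) =====
-- stated objective: alternative
-- what changed: Replaced the itertools.product enumeration that recomputes every user's buy-sum from scratch for each full assignment by a recursive backtracking DFS over emoticons that maintains (and undoes) a running per-user buy-sum array, so each leaf only scans users once instead of users x emoticons.
import Mathlib
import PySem

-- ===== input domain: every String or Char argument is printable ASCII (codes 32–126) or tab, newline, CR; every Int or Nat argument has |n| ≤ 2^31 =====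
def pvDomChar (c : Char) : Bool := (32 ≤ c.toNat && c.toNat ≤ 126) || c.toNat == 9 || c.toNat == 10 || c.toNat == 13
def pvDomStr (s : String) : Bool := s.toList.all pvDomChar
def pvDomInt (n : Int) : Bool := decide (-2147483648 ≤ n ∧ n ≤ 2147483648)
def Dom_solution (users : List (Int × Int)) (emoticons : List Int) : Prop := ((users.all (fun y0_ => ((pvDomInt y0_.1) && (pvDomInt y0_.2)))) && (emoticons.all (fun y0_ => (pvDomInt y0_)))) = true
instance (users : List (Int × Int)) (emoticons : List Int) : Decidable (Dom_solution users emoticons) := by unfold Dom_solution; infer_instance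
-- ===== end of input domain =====

-- B replaces A's product() enumeration (which recomputes every user's buy-sum per full
-- assignment) by a backtracking DFS maintaining running per-user buy-sums, doing one
-- user scan per leaf instead of one per (user, emoticon) pair.

-- ===== PORT A =====
def aRates : List Int := [10, 20, 30, 40]

-- product(range(4), repeat=n), in itertools' lexicographic order (leftmost varies slowest)
def aChoices : Nat → List (List Int)
  | 0 => [[]]
  | n + 1 => ([0, 1, 2, 3] : List Int).flatMap (fun a => (aChoices n).map (a :: ·))

-- the inner two loops of A: (sub_cnt, revenue) for one choice
def aEval (users : List (Int × Int)) (discounted : List (List Int)) (choice : List Int) :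
    Int × Int :=
  users.foldl
    (fun sr u =>
      let buy :=
        (PySem.List.enumerate choice 0).foldl
          (fun bs p =>
            if PySem.List.pyGetD aRates p.2 0 ≥ u.1 then
              bs + PySem.List.pyGetD (PySem.List.pyGetD discounted p.1 []) p.2 0
            else bs)
          0
      if buy ≥ u.2 then (sr.1 + 1, sr.2) else (sr.1, sr.2 + buy))
    (0, 0)

def solution (users : List (Int × Int)) (emoticons : List Int) : List Int :=
  let discounted :=
    emoticons.map (fun price => aRates.map (fun r => PySem.Int.floordiv (price * (100 - r)) 100))
  let best :=
    (aChoices emoticons.length).foldl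
      (fun best ch =>
        let sr := aEval users discounted ch
        if sr.1 > best.1 ∨ (sr.1 = best.1 ∧ sr.2 > best.2) then sr else best)
      ((-1 : Int), (-1 : Int))
  [best.1, best.2]

-- ===== PORT B =====
def bRates : List Int := [10, 20, 30, 40]

-- the base case of dfs: (sub_cnt, revenue) from the maintained per-user sums
-- (Source B's index loop 'for u in range(m)' over the parallel arrays sums/users is a fold over sums.zip users)
def bLeaf (users : List (Int × Int)) (sums : List Int) : Int × Int :=
  (sums.zip users).foldl
    (fun sr p => if p.1 ≥ p.2.2 then (sr.1 + 1, sr.2) else (sr.1, sr.2 + p.1)) (0, 0)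

-- 'sums[u] += d for eligible u' (the in-place update becomes a new list; the undo loop
-- becomes the caller reusing its own sums after the recursive call returns)
def bAdd (users : List (Int × Int)) (sums : List Int) (r d : Int) : List Int :=
  (sums.zip users).map (fun p => if r ≥ p.2.1 then p.1 + d else p.1)

-- dfs(idx): recursion over the remaining discounted rows; 'for sel in range(4)' with
-- r = rates[sel], d = discounted[idx][sel] is a fold over bRates.zip row
def bDfs (users : List (Int × Int)) :
    List (List Int) → List Int → Int × Int → Int × Int
  | [], sums, best =>
      let sr := bLeaf users sums
      if sr.1 > best.1 ∨ (sr.1 = best.1 ∧ sr.2 > best.2) then sr else best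
  | row :: rest, sums, best =>
      (bRates.zip row).foldl (fun b rd => bDfs users rest (bAdd users sums rd.1 rd.2) b) best

def solution_alt (users : List (Int × Int)) (emoticons : List Int) : List Int :=
  let discounted :=
    emoticons.map (fun price => bRates.map (fun r => PySem.Int.floordiv (price * (100 - r)) 100))
  let sums := users.map (fun _ => (0 : Int))
  let best := bDfs users discounted sums ((-1 : Int), (-1 : Int))
  [best.1, best.2]

-- ===== PRECONDITION & SPEC =====
def Spec_solution (users : List (Int × Int)) (emoticons : List Int) (out : List Int) : Prop := out = solution_alt users emoticons
instance (users : List (Int × Int)) (emoticons : List Int) (out : List Int) : Decidable (Spec_solution users emoticons out) := by unfold Spec_solution; infer_instance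

-- ===== CLAIM (what is proved, stated in full; the proofs are below) =====
def Claim_equal_solution : Prop := ∀ (users : List (Int × Int)) (emoticons : List Int), Dom_solution users emoticons → Spec_solution users emoticons (solution users emoticons)

-- ===== LEMMAS AND PROOFS =====

-- best-update step, shared shape of both ports
def pvUpd (b sr : Int × Int) : Int × Int :=
  if sr.1 > b.1 ∨ (sr.1 = b.1 ∧ sr.2 > b.2) then sr else b

-- applying bAdd for every (row, sel) pair of a choice
def pvApply (users : List (Int × Int)) (sums : List Int) (rows : List (List Int))
    (ch : List Int) : List Int :=
  (rows.zip ch).foldl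
    (fun s p => bAdd users s (PySem.List.pyGetD bRates p.2 0) (PySem.List.pyGetD p.1 p.2 0)) sums

-- one user's total discounted buy-sum over the (row, sel) pairs
def pvContrib (mr : Int) (l : List (List Int × Int)) : Int :=
  l.foldl
    (fun c p =>
      if PySem.List.pyGetD bRates p.2 0 ≥ mr then c + PySem.List.pyGetD p.1 p.2 0 else c) 0

theorem pv_foldl_flatMap {α β γ : Type} (l : List α) (f : α → List β) (g : γ → β → γ) (b : γ) :
    (l.flatMap f).foldl g b = l.foldl (fun b x => (f x).foldl g b) b := by
  induction l generalizing b with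
  | nil => rfl
  | cons x xs ih => simp [List.flatMap_cons, List.foldl_append, ih]

theorem pv_mem_aChoices_length {n : Nat} {ch : List Int} (h : ch ∈ aChoices n) :
    ch.length = n := by
  induction n generalizing ch with
  | zero => simp [aChoices] at h; simp [h]
  | succ n ih =>
    simp only [aChoices, List.mem_flatMap, List.mem_map] at h
    obtain ⟨a, ha, ch', hch', rfl⟩ := h
    simp [ih hch']

theorem pv_contrib_shift (mr c : Int) (l : List (List Int × Int)) :
    l.foldl
      (fun c p =>
        if PySem.List.pyGetD bRates p.2 0 ≥ mr then c + PySem.List.pyGetD p.1 p.2 0 else c) c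
      = c + pvContrib mr l := by
  induction l generalizing c with
  | nil => simp [pvContrib]
  | cons p t ih =>
    simp only [pvContrib, List.foldl_cons]
    rw [ih, ih]
    split <;> omega

theorem pv_buy_shift (mr c : Int) (rows : List (List Int)) (l : List (Int × Int)) :
    l.foldl
      (fun bs p =>
        if PySem.List.pyGetD aRates p.2 0 ≥ mr then
          bs + PySem.List.pyGetD (PySem.List.pyGetD rows p.1 []) p.2 0
        else bs) c
      = c + l.foldl
      (fun bs p =>
        if PySem.List.pyGetD aRates p.2 0 ≥ mr then
          bs + PySem.List.pyGetD (PySem.List.pyGetD rows p.1 []) p.2 0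
        else bs) 0 := by
  induction l generalizing c with
  | nil => simp
  | cons p t ih =>
    simp only [List.foldl_cons]
    rw [ih, ih (c := if PySem.List.pyGetD aRates p.2 0 ≥ mr then
          0 + PySem.List.pyGetD (PySem.List.pyGetD rows p.1 []) p.2 0
        else 0)]
    split <;> omega

theorem pv_contrib_cons (mr : Int) (p : List Int × Int) (t : List (List Int × Int)) :
    pvContrib mr (p :: t)
      = (if PySem.List.pyGetD bRates p.2 0 ≥ mr then PySem.List.pyGetD p.1 p.2 0 else 0)
        + pvContrib mr t := by
  conv_lhs => simp only [pvContrib, List.foldl_cons]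
  rw [pv_contrib_shift]
  split <;> omega

theorem pv_apply_map (users : List (Int × Int)) (rows : List (List Int)) (ch : List Int)
    (f : Int × Int → Int) :
    pvApply users (users.map f) rows ch
      = users.map (fun u => f u + pvContrib u.1 (rows.zip ch)) := by
  induction rows generalizing ch f with
  | nil => simp [pvApply, pvContrib]
  | cons row rest ih =>
    cases ch with
    | nil => simp [pvApply, pvContrib]
    | cons a ch' =>
      simp only [pvApply, List.zip_cons_cons, List.foldl_cons]
      have hb : bAdd users (users.map f) (PySem.List.pyGetD bRates a 0)
            (PySem.List.pyGetD row a 0)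
          = users.map (fun u =>
              if PySem.List.pyGetD bRates a 0 ≥ u.1 then
                f u + PySem.List.pyGetD row a 0
              else f u) := by
        simp only [bAdd]
        rw [show (users.map f).zip users = users.map (fun u => (f u, u)) by
          simpa using List.zip_map' (f := f) (g := id) (l := users)]
        rw [List.map_map]
        rfl
      rw [hb]
      have hih := ih (ch := ch')
        (f := fun u => if PySem.List.pyGetD bRates a 0 ≥ u.1 then
            f u + PySem.List.pyGetD row a 0 else f u)
      simp only [pvApply] at hih
      rw [hih]
      apply List.map_congr_left
      intro u _
      rw [pv_contrib_cons]
      dsimp only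
      split <;> omega

theorem pv_buy_eq_contrib (mr : Int) (pre rows : List (List Int)) (ch : List Int)
    (hlen : ch.length = rows.length) :
    (PySem.List.enumerate ch (pre.length : Int)).foldl
      (fun bs p =>
        if PySem.List.pyGetD aRates p.2 0 ≥ mr then
          bs + PySem.List.pyGetD (PySem.List.pyGetD (pre ++ rows) p.1 []) p.2 0
        else bs) 0
      = pvContrib mr (rows.zip ch) := by
  induction ch generalizing pre rows with
  | nil => simp [pvContrib]
  | cons a ch' ih =>
    cases rows with
    | nil => simp at hlen
    | cons row rest =>
      simp only [PySem.List.enumerate_cons, List.foldl_cons]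
      rw [pv_buy_shift]
      have hget : PySem.List.pyGetD (pre ++ row :: rest) (pre.length : Int) ([] : List Int)
          = row := by
        rw [PySem.List.pyGetD_natCast]
        simp [List.getD_eq_getElem?_getD]
      rw [hget]
      have hlen' : ch'.length = rest.length := by simpa using hlen
      have hpre : ((pre ++ [row]).length : Int) = (pre.length : Int) + 1 := by
        simp
      have hih := ih (pre := pre ++ [row]) (rows := rest) hlen'
      rw [hpre] at hih
      simp only [List.append_assoc, List.singleton_append] at hih
      rw [hih]
      rw [List.zip_cons_cons, pv_contrib_cons]
      dsimp only
      rw [show PySem.List.pyGetD aRates a 0 = PySem.List.pyGetD bRates a 0 from rfl]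
      split <;> omega

theorem pv_eval_eq_leaf (users : List (Int × Int)) (rows : List (List Int)) (ch : List Int)
    (hlen : ch.length = rows.length) :
    aEval users rows ch
      = bLeaf users (pvApply users (users.map (fun _ => (0 : Int))) rows ch) := by
  rw [pv_apply_map]
  simp only [aEval, bLeaf]
  rw [show (users.map (fun u => (0 : Int) + pvContrib u.1 (rows.zip ch))).zip users
      = users.map (fun u => ((0 : Int) + pvContrib u.1 (rows.zip ch), u)) by
    simpa using List.zip_map' (f := fun u : Int × Int => (0 : Int) + pvContrib u.1 (rows.zip ch))
      (g := id) (l := users)]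
  rw [List.foldl_map]
  apply PySem.List.foldl_congr_mem
  intro sr u _
  have hbuy : (PySem.List.enumerate ch 0).foldl
      (fun bs p =>
        if PySem.List.pyGetD aRates p.2 0 ≥ u.1 then
          bs + PySem.List.pyGetD (PySem.List.pyGetD rows p.1 []) p.2 0
        else bs) 0 = pvContrib u.1 (rows.zip ch) := by
    simpa using pv_buy_eq_contrib u.1 [] rows ch hlen
  simp only [hbuy]
  simp

theorem pv_dfs_eq_fold (users : List (Int × Int)) (rows : List (List Int))
    (hR : ∀ row ∈ rows, ∃ d0 d1 d2 d3 : Int, row = [d0, d1, d2, d3]) :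
    ∀ (sums : List Int) (best : Int × Int),
    bDfs users rows sums best
      = (aChoices rows.length).foldl
          (fun b ch => pvUpd b (bLeaf users (pvApply users sums rows ch))) best := by
  induction rows with
  | nil =>
    intro sums best
    simp [bDfs, aChoices, pvApply, pvUpd]
  | cons row rest ih =>
    intro sums best
    obtain ⟨d0, d1, d2, d3, rfl⟩ := hR row (List.mem_cons_self ..)
    have hR' : ∀ r ∈ rest, ∃ d0 d1 d2 d3 : Int, r = [d0, d1, d2, d3] := by
      intro r hr; exact hR r (List.mem_cons_of_mem _ hr)
    have ih' := ih hR'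
    simp only [List.length_cons, aChoices, pv_foldl_flatMap, List.foldl_map]
    show (bRates.zip [d0, d1, d2, d3]).foldl _ best = _
    simp only [bRates, List.zip_cons_cons, List.zip_nil_right, List.foldl_cons,
      List.foldl_nil]
    rw [ih', ih', ih', ih']
    have hstep : ∀ (a : Int) (b : Int × Int),
        (aChoices rest.length).foldl
          (fun b ch => pvUpd b (bLeaf users (pvApply users
            (bAdd users sums (PySem.List.pyGetD bRates a 0) (PySem.List.pyGetD [d0,d1,d2,d3] a 0))
            rest ch))) b
        = (aChoices rest.length).foldl
          (fun b ch => pvUpd b (bLeaf users (pvApply users sums ([d0,d1,d2,d3] :: rest) (a :: ch)))) b := by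
      intro a b
      apply PySem.List.foldl_congr_mem
      intro b' ch _
      simp [pvApply]
    have h0 := hstep 0 best
    have h1 := hstep 1
    have h2 := hstep 2
    have h3 := hstep 3
    simp only [show PySem.List.pyGetD bRates (0:Int) 0 = 10 from rfl,
      show PySem.List.pyGetD bRates (1:Int) 0 = 20 from rfl,
      show PySem.List.pyGetD bRates (2:Int) 0 = 30 from rfl,
      show PySem.List.pyGetD bRates (3:Int) 0 = 40 from rfl,
      show ∀ x : Int, PySem.List.pyGetD [d0,d1,d2,d3] (0:Int) x = d0 from fun _ => rfl,
      show ∀ x : Int, PySem.List.pyGetD [d0,d1,d2,d3] (1:Int) x = d1 from fun _ => rfl,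
      show ∀ x : Int, PySem.List.pyGetD [d0,d1,d2,d3] (2:Int) x = d2 from fun _ => rfl,
      show ∀ x : Int, PySem.List.pyGetD [d0,d1,d2,d3] (3:Int) x = d3 from fun _ => rfl] at h0 h1 h2 h3
    rw [h0, h1 _, h2 _, h3 _]

-- ===== VERDICT (by name: the statement is the Claim_ definition above) =====
theorem solution_spec : Claim_equal_solution := by
  intro users emoticons _
  unfold Spec_solution solution solution_alt
  set rows := emoticons.map
    (fun price => aRates.map (fun r => PySem.Int.floordiv (price * (100 - r)) 100)) with hrows
  have hR : ∀ row ∈ rows, ∃ d0 d1 d2 d3 : Int, row = [d0, d1, d2, d3] := by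
    intro row hrow
    rw [hrows] at hrow
    simp only [List.mem_map] at hrow
    obtain ⟨p, _, rfl⟩ := hrow
    exact ⟨_, _, _, _, rfl⟩
  have hlenrows : rows.length = emoticons.length := by simp [hrows]
  have hbr : emoticons.map
      (fun price => bRates.map (fun r => PySem.Int.floordiv (price * (100 - r)) 100)) = rows := rfl
  simp only [hbr]
  rw [pv_dfs_eq_fold users rows hR, hlenrows]
  have hfold : (aChoices emoticons.length).foldl
      (fun best ch =>
        let sr := aEval users rows ch
        if sr.1 > best.1 ∨ (sr.1 = best.1 ∧ sr.2 > best.2) then sr else best)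
      ((-1 : Int), (-1 : Int))
    = (aChoices emoticons.length).foldl
      (fun b ch => pvUpd b (bLeaf users (pvApply users (users.map (fun _ => (0:Int))) rows ch)))
      ((-1 : Int), (-1 : Int)) := by
    apply PySem.List.foldl_congr_mem
    intro b ch hch
    rw [pvUpd, pv_eval_eq_leaf users rows ch (by rw [pv_mem_aChoices_length hch, hlenrows])]
  rw [hfold]
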